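-- pv_equiv track=rewrite | github.com/shuozh/MEG-Net | utils.py | get_45_position
-- ===== SOURCE A (Python) =====
-- def get_45_position(view_n):
--     start_position_list = []
--     for i in range(view_n):
--         start_position_list.append(([i], [0]))
--     for j in range(1, view_n):
--         start_position_list.append(([view_n - 1], [j]))
--     for item in start_position_list:
--         while item[0][0] > 0 and item[1][0] < view_n - 1:
--             item[0].insert(0, item[0][0] - 1)
--             item[1].insert(0, item[1][0] + 1)
--     return start_position_list
-- ===== SOURCE B (Python) =====
-- def get_45_position(view_n):
--     result = []
--     for d in range(2 * view_n - 1):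
--         rows = list(range(max(0, d - view_n + 1), min(d, view_n - 1) + 1))
--         cols = [d - r for r in rows]
--         result.append((rows, cols))
--     return result
-- ===== Notes on version B (the rewrite author's own statement) =====
-- stated objective: simpler
-- what changed: B computes each anti-diagonal directly by a closed-form index range over the diagonal sum d, instead of seeding endpoint pairs in two loops and extending each by front-insertion in a while loop.
import Mathlib
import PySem

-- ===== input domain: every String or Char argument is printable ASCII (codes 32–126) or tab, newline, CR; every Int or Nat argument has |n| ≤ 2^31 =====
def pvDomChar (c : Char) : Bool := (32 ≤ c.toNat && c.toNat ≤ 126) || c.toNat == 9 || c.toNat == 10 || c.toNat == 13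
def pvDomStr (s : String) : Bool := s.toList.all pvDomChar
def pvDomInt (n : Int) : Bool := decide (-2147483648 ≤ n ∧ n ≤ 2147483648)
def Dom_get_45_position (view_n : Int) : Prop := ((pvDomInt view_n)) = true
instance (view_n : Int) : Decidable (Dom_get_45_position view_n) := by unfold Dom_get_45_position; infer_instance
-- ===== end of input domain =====

-- B replaces A's endpoint-seeding and while-loop front-insertion by a closed-form
-- index range per diagonal sum d (objective: simpler).

-- ===== PORT A =====
-- the while loop: item[0].insert(0, item[0][0]-1); item[1].insert(0, item[1][0]+1)
-- while item[0][0] > 0 and item[1][0] < view_n - 1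
def extend45 (n : Int) (rows cols : List Int) : List Int × List Int :=
  match rows, cols with
  | r :: rs, c :: cs =>
    if h : 0 < r ∧ c < n - 1 then extend45 n ((r - 1) :: r :: rs) ((c + 1) :: c :: cs)
    else (r :: rs, c :: cs)
  | rows, cols => (rows, cols)
termination_by (rows.headD 0).toNat
decreasing_by simp; omega

def get_45_position (view_n : Int) : List (List Int × List Int) :=
  let l1 := (PySem.List.pyRange 0 view_n 1).map (fun i => (([i] : List Int), ([0] : List Int)))
  let l2 := (PySem.List.pyRange 1 view_n 1).map (fun j => (([view_n - 1] : List Int), ([j] : List Int)))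
  (l1 ++ l2).map (fun item => extend45 view_n item.1 item.2)

-- ===== PORT B =====
def get_45_position_alt (view_n : Int) : List (List Int × List Int) :=
  (PySem.List.pyRange 0 (2 * view_n - 1) 1).map (fun d =>
    let rows := PySem.List.pyRange (max 0 (d - view_n + 1)) (min d (view_n - 1) + 1) 1
    (rows, rows.map (fun r => d - r)))

-- ===== PRECONDITION & SPEC =====
def Spec_get_45_position (view_n : Int) (out : List (List Int × List Int)) : Prop := out = get_45_position_alt view_n
instance (view_n : Int) (out : List (List Int × List Int)) : Decidable (Spec_get_45_position view_n out) := by unfold Spec_get_45_position; infer_instance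

-- ===== CLAIM (what is proved, stated in full; the proofs are below) =====
def Claim_equal_get_45_position : Prop := ∀ (view_n : Int), Dom_get_45_position view_n → Spec_get_45_position view_n (get_45_position view_n)

-- ===== LEMMAS AND PROOFS =====

-- characterisation of the while loop: it prepends the ascending range down to 0 or to the column boundary
theorem extend45_eq (n : Int) (r c : Int) (rs cs : List Int) (hr : 0 ≤ r) :
    extend45 n (r :: rs) (c :: cs) =
      (PySem.List.pyRange (r - min r (max 0 (n - 1 - c))) (r + 1) 1 ++ rs,
       (PySem.List.pyRange (r - min r (max 0 (n - 1 - c))) (r + 1) 1).map (fun x => c + r - x) ++ cs) := by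
  induction hk : r.toNat using Nat.strong_induction_on generalizing r c rs cs with
  | _ k ih =>
  rw [extend45]
  split
  · -- loop body: recurse on (r-1, c+1)
    rename_i hcond
    rw [ih (r - 1).toNat (by omega) (r - 1) (c + 1) (r :: rs) (c :: cs) (by omega) rfl]
    have hr1 : r - 1 + 1 = r := by ring
    have ht : (r - 1) - min (r - 1) (max 0 (n - 1 - (c + 1))) = r - min r (max 0 (n - 1 - c)) := by
      omega
    have hle : r - min r (max 0 (n - 1 - c)) ≤ r := by omega
    rw [hr1, ht, PySem.List.pyRange_one_succ_right hle]
    have hfun : (PySem.List.pyRange (r - min r (max 0 (n - 1 - c))) r 1).map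
          (fun x => c + 1 + (r - 1) - x) =
        (PySem.List.pyRange (r - min r (max 0 (n - 1 - c))) r 1).map (fun x => c + r - x) :=
      List.map_congr_left (fun x _ => by ring)
    rw [hfun]
    have hc : c + r - r = c := by ring
    simp [hc]
  · -- loop exit: the range is the singleton [r]
    rename_i hcond
    have h0 : min r (max 0 (n - 1 - c)) = 0 := by omega
    rw [h0]
    simp [PySem.List.pyRange_one_singleton]

-- ===== VERDICT (by name: the statement is the Claim_ definition above) =====
theorem get_45_position_spec : Claim_equal_get_45_position := by
  intro n _
  show _ = _
  unfold get_45_position get_45_position_alt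
  by_cases hn : n ≤ 0
  · rw [PySem.List.pyRange_one_eq_nil hn, PySem.List.pyRange_one_eq_nil (by omega : n ≤ 1),
      PySem.List.pyRange_one_eq_nil (by omega : 2 * n - 1 ≤ 0)]
    rfl
  · rw [not_le] at hn
    rw [PySem.List.pyRange_one_append 0 n (2 * n - 1) (by omega) (by omega), List.map_append,
      List.map_append]
    congr 1
    · -- the diagonals starting at (i, 0), i = 0 .. n-1
      rw [List.map_map]
      apply List.map_congr_left
      intro i hi
      rw [PySem.List.mem_pyRange_one] at hi
      show extend45 n [i] [0] = _
      rw [extend45_eq n i 0 [] [] hi.1]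
      have h1 : i - min i (max 0 (n - 1 - 0)) = max 0 (i - n + 1) := by omega
      have h2 : i + 1 = min i (n - 1) + 1 := by omega
      rw [h1, h2]
      simp only [List.append_nil, Prod.mk.injEq, true_and]
      apply List.map_congr_left; intro x _; ring
    · -- the diagonals starting at (n-1, j), j = 1 .. n-1
      rw [PySem.List.pyRange_one 1 n, PySem.List.pyRange_one n (2 * n - 1)]
      simp only [List.map_map]
      have hlen : (2 * n - 1 - n).toNat = (n - 1).toNat := by omega
      rw [hlen]
      apply List.map_congr_left
      intro k hk
      rw [List.mem_range] at hk
      have hk' : (k : Int) < n - 1 := by omega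
      show extend45 n [n - 1] [1 + k] = _
      rw [extend45_eq n (n - 1) (1 + k) [] [] (by omega)]
      have h1 : (n - 1) - min (n - 1) (max 0 (n - 1 - (1 + (k : Int)))) = max 0 (n + k - n + 1) := by
        omega
      have h2 : (n : Int) - 1 + 1 = min (n + k) (n - 1) + 1 := by omega
      rw [h1, h2]
      simp only [List.append_nil, Function.comp_apply, Prod.mk.injEq, true_and]
      apply List.map_congr_left; intro x _; ring
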